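-- pv_equiv track=rewrite | github.com/qperotti/Cracking-The-Coding-Interview-Python | Chapter 10 - Sorting and Searching/ex5.py | search
-- ===== SOURCE A (Python) =====
-- def search(myList,start,end,target):
-- 	if start > end:
-- 		return -1;
--
-- 	middle = (start + end)//2
-- 	if target == myList[middle]:
-- 		return middle
--
-- 	if myList[middle] != '':
-- 		if target < myList[middle]:
-- 			return search(myList,start,middle-1,target)
-- 		else:
-- 			return search(myList,middle+1,end,target)
-- 	else:
-- 		before = after = middle
-- 		before, after = before-1, after+1
-- 		while(True):
--
-- 			# We look backwards
-- 			if before >= start: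
-- 				if myList[before] != '':
-- 					if target == myList[before]:
-- 						return before
-- 					if target < myList[before]:
-- 						return search(myList,start,before-1,target)
-- 					# Stop loking backwards
-- 					before = start-1
-- 				else:
-- 					before -= 1
--
-- 			# We look forwards
-- 			elif after <= end:
-- 				if myList[after] != '':
-- 					if target == myList[after]:
-- 						return after
-- 					if target > myList[after]:
-- 						return search(myList,after+1,end,target)
-- 					# Stop loking forwards
-- 					after = end+1
-- 				else:
-- 					after += 1
-- 			# We arrived to both ends
-- 			else:
-- 				return -1
-- ===== SOURCE B (Python) =====
-- def search(myList, start, end, target):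
--     # Iterative binary search over a sparse sorted list: a while loop maintaining
--     # start/end; on an empty middle, scan left for the nearest non-empty first,
--     # then right, narrowing the window instead of recursing.
--     while start <= end:
--         middle = (start + end) // 2
--         if myList[middle] == target:
--             return middle
--         if myList[middle] != '':
--             if target < myList[middle]:
--                 end = middle - 1
--             else:
--                 start = middle + 1
--             continue
--         # empty middle: scan left to the nearest non-empty entry
--         i = middle - 1
--         while i >= start and myList[i] == '':
--             i -= 1
--         if i >= start:
--             if myList[i] == target:
--                 return i
--             if target < myList[i]:
--                 end = i - 1
--                 continue
--         # nothing usable on the left: scan right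
--         j = middle + 1
--         while j <= end and myList[j] == '':
--             j += 1
--         if j <= end:
--             if myList[j] == target:
--                 return j
--             if target > myList[j]:
--                 start = j + 1
--                 continue
--         return -1
--     return -1
-- ===== Notes on version B (the rewrite author's own statement) =====
-- stated objective: alternative
-- what changed: Replaces A's recursion with an iterative `while start <= end` loop and replaces A's single interleaved before/after `while True` loop by two plain directional scans (left to the nearest non-empty entry first, then right) that narrow the window in place.
-- outside the precondition, e.g. on search(['a', 'b'], -2, 1, 'a'): A returns -2, B returns -2
import Mathlib
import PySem

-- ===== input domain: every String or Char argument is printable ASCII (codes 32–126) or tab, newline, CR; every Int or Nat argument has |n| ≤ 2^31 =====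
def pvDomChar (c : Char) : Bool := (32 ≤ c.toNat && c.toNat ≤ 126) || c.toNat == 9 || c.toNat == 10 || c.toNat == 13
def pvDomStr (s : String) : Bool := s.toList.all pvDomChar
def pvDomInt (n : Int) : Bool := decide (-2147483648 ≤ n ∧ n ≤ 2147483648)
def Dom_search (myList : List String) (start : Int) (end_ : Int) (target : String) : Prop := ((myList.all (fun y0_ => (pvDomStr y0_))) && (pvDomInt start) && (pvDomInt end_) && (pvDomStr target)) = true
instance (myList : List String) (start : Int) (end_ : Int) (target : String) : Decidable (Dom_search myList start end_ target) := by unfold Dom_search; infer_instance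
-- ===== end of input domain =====

-- B rewrites A's recursive sparse binary search as an iterative while-loop with two plain
-- directional scans (left first, then right); same return value on every valid window.
-- Loops are ported as structural recursion on an explicit fuel that is an exact bound on
-- the number of iterations (a totality guard only; it is never exhausted).

-- Shared indexing primitive: myList[i]. Inside Pre_search every access lies in
-- [start, end] ⊆ [0, len), so pyGet? is some and the "" default is never read.
def pyAt (l : List String) (i : Int) : String := (PySem.List.pyGet? l i).getD ""

-- ===== PORT A =====
-- Outcome of A's inner `while True` loop: return an index, make one of the two
-- recursive `return search(...)` calls, or return -1.
inductive ScanOutcome where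
  | found : Int → ScanOutcome
  | recLeft : Int → ScanOutcome
  | recRight : Int → ScanOutcome
  | notFound : ScanOutcome
deriving DecidableEq, Repr

-- A's `while True` loop with state (before, after), transliterated branch for branch.
-- Fuel = the exact remaining-iterations measure; fuel 0 means both scans are finished
-- (before < s and after > e), where the loop returns -1 (.notFound).
def scanLoop (l : List String) (s e : Int) (t : String) : Nat → Int → Int → ScanOutcome
  | 0, _, _ => .notFound
  | fuel + 1, before, after =>
    if s ≤ before then
      if pyAt l before ≠ "" then
        if t = pyAt l before then .found before
        else if t < pyAt l before then .recLeft (before - 1)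
        else scanLoop l s e t fuel (s - 1) after     -- before = start-1: stop looking backwards
      else scanLoop l s e t fuel (before - 1) after
    else if after ≤ e then
      if pyAt l after ≠ "" then
        if t = pyAt l after then .found after
        else if pyAt l after < t then .recRight (after + 1)
        else scanLoop l s e t fuel before (e + 1)    -- after = end+1: stop looking forwards
      else scanLoop l s e t fuel before (after + 1)
    else .notFound

-- A's recursion; every recursive call shrinks end_-start by at least 1, so the top-level
-- fuel in `search` is never exhausted.
def searchGo (l : List String) (t : String) : Nat → Int → Int → Int
  | 0, _, _ => -1
  | fuel + 1, start, end_ =>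
    if start > end_ then -1
    else
      let middle := PySem.Int.floordiv (start + end_) 2
      if t = pyAt l middle then middle
      else if pyAt l middle ≠ "" then
        if t < pyAt l middle then searchGo l t fuel start (middle - 1)
        else searchGo l t fuel (middle + 1) end_
      else
        match scanLoop l start end_ t
            ((middle - start).toNat + (end_ - middle).toNat) (middle - 1) (middle + 1) with
        | .found i => i
        | .recLeft e' => searchGo l t fuel start e'
        | .recRight s' => searchGo l t fuel s' end_
        | .notFound => -1

def search (myList : List String) (start : Int) (end_ : Int) (target : String) : Int :=
  searchGo myList target ((end_ - start + 2).toNat + 1) start end_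

-- ===== PORT B =====
-- `i = middle-1; while i >= start and myList[i] == '': i -= 1` (fuel = exact step bound)
def scanLeft (l : List String) (s : Int) : Nat → Int → Int
  | 0, i => i
  | fuel + 1, i => if s ≤ i ∧ pyAt l i = "" then scanLeft l s fuel (i - 1) else i

-- `j = middle+1; while j <= end and myList[j] == '': j += 1` (fuel = exact step bound)
def scanRight (l : List String) (e : Int) : Nat → Int → Int
  | 0, j => j
  | fuel + 1, j => if j ≤ e ∧ pyAt l j = "" then scanRight l e fuel (j + 1) else j

-- B's `while start <= end` loop; each `continue` with narrowed bounds is a tail call.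
def searchAltGo (l : List String) (t : String) : Nat → Int → Int → Int
  | 0, _, _ => -1
  | fuel + 1, start, end_ =>
    if start ≤ end_ then
      let middle := PySem.Int.floordiv (start + end_) 2
      if pyAt l middle = t then middle
      else if pyAt l middle ≠ "" then
        if t < pyAt l middle then searchAltGo l t fuel start (middle - 1)
        else searchAltGo l t fuel (middle + 1) end_
      else
        let i := scanLeft l start (middle - start).toNat (middle - 1)
        if start ≤ i ∧ pyAt l i = t then i
        else if start ≤ i ∧ t < pyAt l i then searchAltGo l t fuel start (i - 1)
        else
          let j := scanRight l end_ (end_ - middle).toNat (middle + 1)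
          if j ≤ end_ ∧ pyAt l j = t then j
          else if j ≤ end_ ∧ pyAt l j < t then searchAltGo l t fuel (j + 1) end_
          else -1
    else -1

def search_alt (myList : List String) (start : Int) (end_ : Int) (target : String) : Int :=
  searchAltGo myList target ((end_ - start + 2).toNat + 1) start end_

-- ===== PRECONDITION & SPEC =====
-- Pre_search: either the window is empty (A returns -1 at once) or it is a valid index
-- window 0 ≤ start ≤ end_ < len.  Excluded: windows reaching outside [0, len), on which A
-- either raises IndexError or returns an index obtained through Python's negative-index
-- wraparound — an artefact of the implementation, not a value of the search.
def Pre_search (myList : List String) (start : Int) (end_ : Int) (target : String) : Prop :=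
  end_ < start ∨ (0 ≤ start ∧ start ≤ end_ ∧ end_ < (myList.length : Int))
instance (myList : List String) (start : Int) (end_ : Int) (target : String) : Decidable (Pre_search myList start end_ target) := by unfold Pre_search; infer_instance

def pvWitness_search : List String × Int × Int × String := (["a", "", "c"], 0, 2, "c")

def Spec_search (myList : List String) (start : Int) (end_ : Int) (target : String) (out : Int) : Prop := out = search_alt myList start end_ target
instance (myList : List String) (start : Int) (end_ : Int) (target : String) (out : Int) : Decidable (Spec_search myList start end_ target out) := by unfold Spec_search; infer_instance

-- ===== CLAIM (what is proved, stated in full; the proofs are below) =====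
def Claim_equal_search : Prop := ∀ (myList : List String) (start : Int) (end_ : Int) (target : String), Dom_search myList start end_ target → Pre_search myList start end_ target → Spec_search myList start end_ target (search myList start end_ target)

-- ===== LEMMAS AND PROOFS =====

-- The value A's loop computes once the backward scan is over (before < start):
-- B's right scan, then the forward-phase comparisons.
def fwdResult (l : List String) (e : Int) (t : String) (a : Int) : ScanOutcome :=
  let j := scanRight l e (e - a + 1).toNat a
  if j ≤ e then
    if t = pyAt l j then .found j
    else if pyAt l j < t then .recRight (j + 1)
    else .notFound
  else .notFound

-- A's forward phase (before already < start) is B's right scan.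
theorem scanLoop_fwd (l : List String) (s e : Int) (t : String) :
    ∀ (fuel : Nat) (a b : Int), b < s → (e - a + 1).toNat ≤ fuel →
      scanLoop l s e t fuel b a = fwdResult l e t a := by
  intro fuel
  induction fuel with
  | zero =>
    intro a b hb hf
    simp only [scanLoop, fwdResult]
    rw [show (e - a + 1).toNat = 0 by omega]
    simp only [scanRight]
    rw [if_neg (show ¬ a ≤ e by omega)]
  | succ fuel ih =>
    intro a b hb hf
    simp only [scanLoop]
    rw [if_neg (show ¬ s ≤ b by omega)]
    by_cases hae : a ≤ e
    · rw [if_pos hae]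
      obtain ⟨k, hk⟩ : ∃ k, (e - a + 1).toNat = k + 1 := ⟨(e - a).toNat, by omega⟩
      by_cases hne : pyAt l a = ""
      · simp only [ne_eq, hne, not_true_eq_false, if_false]
        rw [ih (a + 1) b hb (by omega)]
        simp only [fwdResult, hk]
        rw [show (e - (a + 1) + 1).toNat = k by omega]
        simp only [scanRight]
        rw [if_pos (show a ≤ e ∧ pyAt l a = "" from ⟨hae, hne⟩)]
      · simp only [ne_eq, hne, not_false_eq_true, if_true]
        have hsr : scanRight l e (e - a + 1).toNat a = a := by
          rw [hk]
          simp only [scanRight]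
          rw [if_neg (show ¬ (a ≤ e ∧ pyAt l a = "") from fun h => hne h.2)]
        by_cases ht : t = pyAt l a
        · rw [if_pos ht]
          simp only [fwdResult, hsr]
          rw [if_pos hae, if_pos ht]
        · rw [if_neg ht]
          by_cases hlt : pyAt l a < t
          · rw [if_pos hlt]
            simp only [fwdResult, hsr]
            rw [if_pos hae, if_neg ht, if_pos hlt]
          · rw [if_neg hlt]
            rw [ih (e + 1) b hb (by omega)]
            simp only [fwdResult, hsr]
            rw [show (e - (e + 1) + 1).toNat = 0 by omega]
            simp only [scanRight]
            rw [if_neg (show ¬ e + 1 ≤ e by omega), if_pos hae, if_neg ht, if_neg hlt]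
    · rw [if_neg hae]
      have hsr : scanRight l e (e - a + 1).toNat a = a := by
        rw [show (e - a + 1).toNat = 0 by omega]
        simp only [scanRight]
      simp only [fwdResult, hsr]
      rw [if_neg hae]

-- A's backward phase is B's left scan, falling through to the forward phase.
theorem scanLoop_back (l : List String) (s e : Int) (t : String) :
    ∀ (fuel : Nat) (b a : Int), (b - s + 1).toNat + (e - a + 1).toNat ≤ fuel →
      scanLoop l s e t fuel b a =
        (let i := scanLeft l s (b - s + 1).toNat b
         if s ≤ i then
           if t = pyAt l i then .found i
           else if t < pyAt l i then .recLeft (i - 1)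
           else fwdResult l e t a
         else fwdResult l e t a) := by
  intro fuel
  induction fuel with
  | zero =>
    intro b a hf
    have hb : b < s := by omega
    rw [scanLoop_fwd l s e t 0 a b hb (by omega)]
    rw [show (b - s + 1).toNat = 0 by omega]
    simp only [scanLeft]
    rw [if_neg (show ¬ s ≤ b by omega)]
  | succ fuel ih =>
    intro b a hf
    by_cases hsb : s ≤ b
    · simp only [scanLoop]
      rw [if_pos hsb]
      obtain ⟨k, hk⟩ : ∃ k, (b - s + 1).toNat = k + 1 := ⟨(b - s).toNat, by omega⟩
      by_cases hne : pyAt l b = ""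
      · simp only [ne_eq, hne, not_true_eq_false, if_false]
        rw [ih (b - 1) a (by omega)]
        simp only [hk]
        rw [show (b - 1 - s + 1).toNat = k by omega]
        simp only [scanLeft]
        rw [if_pos (show s ≤ b ∧ pyAt l b = "" from ⟨hsb, hne⟩)]
      · have hsl : scanLeft l s (b - s + 1).toNat b = b := by
          rw [hk]
          simp only [scanLeft]
          rw [if_neg (show ¬ (s ≤ b ∧ pyAt l b = "") from fun h => hne h.2)]
        simp only [ne_eq, hne, not_false_eq_true, if_true, hsl]
        rw [if_pos hsb]
        by_cases ht : t = pyAt l b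
        · rw [if_pos ht, if_pos ht]
        · rw [if_neg ht, if_neg ht]
          by_cases hlt : t < pyAt l b
          · rw [if_pos hlt, if_pos hlt]
          · rw [if_neg hlt, if_neg hlt]
            exact scanLoop_fwd l s e t fuel a (s - 1) (by omega) (by omega)
    · have hsl : scanLeft l s (b - s + 1).toNat b = b := by
        rw [show (b - s + 1).toNat = 0 by omega]
        simp only [scanLeft]
      rw [scanLoop_fwd l s e t (fuel + 1) a b (by omega) (by omega)]
      simp only [hsl]
      rw [if_neg hsb]

-- Main induction on the (shared) fuel: the two recursions agree step for step.
theorem go_eq (l : List String) (t : String) :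
    ∀ (fuel : Nat) (s e : Int), searchGo l t fuel s e = searchAltGo l t fuel s e := by
  intro fuel
  induction fuel with
  | zero => intro s e; rfl
  | succ fuel ih =>
    intro s e
    simp only [searchGo, searchAltGo]
    by_cases hse : s > e
    · rw [if_pos hse, if_neg (show ¬ s ≤ e by omega)]
    · simp only [if_neg hse, if_pos (show s ≤ e by omega)]
      set m := PySem.Int.floordiv (s + e) 2 with hm
      by_cases heq : t = pyAt l m
      · rw [if_pos heq, if_pos heq.symm]
      · rw [if_neg heq, if_neg (show ¬ pyAt l m = t from fun h => heq h.symm)]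
        by_cases hne : pyAt l m = ""
        · -- empty middle: A's loop = B's left scan, then right scan
          simp only [ne_eq, hne, not_true_eq_false, if_false]
          rw [scanLoop_back l s e t _ (m - 1) (m + 1) (by omega)]
          simp only
          rw [show (m - 1 - s + 1).toNat = (m - s).toNat by omega]
          set i := scanLeft l s (m - s).toNat (m - 1) with hi
          by_cases hsi : s ≤ i
          · rw [if_pos hsi]
            by_cases hit : t = pyAt l i
            · rw [if_pos hit]
              rw [if_pos (show s ≤ i ∧ pyAt l i = t from ⟨hsi, hit.symm⟩)]
            · rw [if_neg hit, if_neg (show ¬ (s ≤ i ∧ pyAt l i = t) from fun h => hit h.2.symm)]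
              by_cases hlt : t < pyAt l i
              · rw [if_pos hlt, if_pos (show s ≤ i ∧ t < pyAt l i from ⟨hsi, hlt⟩)]
                exact ih s (i - 1)
              · rw [if_neg hlt, if_neg (show ¬ (s ≤ i ∧ t < pyAt l i) from fun h => hlt h.2)]
                simp only [fwdResult]
                rw [show (e - (m + 1) + 1).toNat = (e - m).toNat by omega]
                set j := scanRight l e (e - m).toNat (m + 1) with hj
                by_cases hje : j ≤ e
                · rw [if_pos hje]
                  by_cases hjt : t = pyAt l j
                  · rw [if_pos hjt, if_pos (show j ≤ e ∧ pyAt l j = t from ⟨hje, hjt.symm⟩)]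
                  · rw [if_neg hjt,
                        if_neg (show ¬ (j ≤ e ∧ pyAt l j = t) from fun h => hjt h.2.symm)]
                    by_cases hjlt : pyAt l j < t
                    · rw [if_pos hjlt, if_pos (show j ≤ e ∧ pyAt l j < t from ⟨hje, hjlt⟩)]
                      exact ih (j + 1) e
                    · rw [if_neg hjlt,
                          if_neg (show ¬ (j ≤ e ∧ pyAt l j < t) from fun h => hjlt h.2)]
                · rw [if_neg hje, if_neg (show ¬ (j ≤ e ∧ pyAt l j = t) from fun h => hje h.1),
                      if_neg (show ¬ (j ≤ e ∧ pyAt l j < t) from fun h => hje h.1)]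
          · rw [if_neg hsi, if_neg (show ¬ (s ≤ i ∧ pyAt l i = t) from fun h => hsi h.1),
                if_neg (show ¬ (s ≤ i ∧ t < pyAt l i) from fun h => hsi h.1)]
            simp only [fwdResult]
            rw [show (e - (m + 1) + 1).toNat = (e - m).toNat by omega]
            set j := scanRight l e (e - m).toNat (m + 1) with hj
            by_cases hje : j ≤ e
            · rw [if_pos hje]
              by_cases hjt : t = pyAt l j
              · rw [if_pos hjt, if_pos (show j ≤ e ∧ pyAt l j = t from ⟨hje, hjt.symm⟩)]
              · rw [if_neg hjt,
                    if_neg (show ¬ (j ≤ e ∧ pyAt l j = t) from fun h => hjt h.2.symm)]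
                by_cases hjlt : pyAt l j < t
                · rw [if_pos hjlt, if_pos (show j ≤ e ∧ pyAt l j < t from ⟨hje, hjlt⟩)]
                  exact ih (j + 1) e
                · rw [if_neg hjlt,
                      if_neg (show ¬ (j ≤ e ∧ pyAt l j < t) from fun h => hjlt h.2)]
            · rw [if_neg hje, if_neg (show ¬ (j ≤ e ∧ pyAt l j = t) from fun h => hje h.1),
                  if_neg (show ¬ (j ≤ e ∧ pyAt l j < t) from fun h => hje h.1)]
        · -- non-empty middle: ordinary binary-search step
          simp only [ne_eq, hne, not_false_eq_true, if_true]
          by_cases hlt : t < pyAt l m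
          · rw [if_pos hlt, if_pos hlt]
            exact ih s (m - 1)
          · rw [if_neg hlt, if_neg hlt]
            exact ih (m + 1) e

-- ===== VERDICT (by name: the statement is the Claim_ definition above) =====
theorem search_spec : Claim_equal_search := by
  intro l s e t _ _
  unfold Spec_search search search_alt
  exact go_eq l t ((e - s + 2).toNat + 1) s e
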